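-- pv_equiv track=rewrite | github.com/aimi-so/aimi-engineering-plugin | plugins/aimi-engineering/skills/docker-sandbox/scripts/acp-adapter.py | validate_env_var_value
-- ===== SOURCE A (Python) =====
-- DANGEROUS_ENV_VALUE_CHARS = {"\n", "\r", "\0", ";", "`"}
--
-- DANGEROUS_ENV_VALUE_SUBSTRINGS = {"&&", "||", "$("}
--
-- def validate_env_var_value(value: str) -> bool:
--     """Validate env var value: reject newlines, null bytes, shell metacharacters."""
--     if not isinstance(value, str):
--         return False
--     if any(c in value for c in DANGEROUS_ENV_VALUE_CHARS):
--         return False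
--     if any(s in value for s in DANGEROUS_ENV_VALUE_SUBSTRINGS):
--         return False
--     return True
-- ===== SOURCE B (Python) =====
-- def validate_env_var_value(value: str) -> bool:
--     """Validate env var value: reject newlines, null bytes, shell metacharacters."""
--     if not isinstance(value, str):
--         return False
--     prev = ""
--     for c in value:
--         if c in "\n\r\0;`":
--             return False
--         if (prev == "&" and c == "&") or (prev == "|" and c == "|") or (prev == "$" and c == "("):
--             return False
--         prev = c
--     return True
-- ===== Notes on version B (the rewrite author's own statement) =====
-- stated objective: alternative
-- what changed: Replaces the multiple membership/substring scans (one per dangerous char and per dangerous substring) with a single left-to-right pass over the characters that tracks the previous character to detect the two-character substrings.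
import Mathlib
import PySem

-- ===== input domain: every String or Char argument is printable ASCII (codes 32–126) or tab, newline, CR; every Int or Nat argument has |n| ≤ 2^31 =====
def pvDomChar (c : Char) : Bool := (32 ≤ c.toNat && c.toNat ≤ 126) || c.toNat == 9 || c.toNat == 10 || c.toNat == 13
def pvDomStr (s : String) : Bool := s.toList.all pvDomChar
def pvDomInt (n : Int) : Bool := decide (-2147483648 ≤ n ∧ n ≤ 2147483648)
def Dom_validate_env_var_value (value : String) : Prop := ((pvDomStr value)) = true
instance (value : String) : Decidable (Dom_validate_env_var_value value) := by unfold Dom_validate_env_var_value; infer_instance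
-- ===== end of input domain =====

-- B replaces A's per-pattern membership/substring scans by a single left-to-right pass
-- tracking the previous character (objective: alternative, same cost).

-- ===== PORT A =====
def pvDangerousChars : List String := ["\n", "\r", "\x00", ";", "`"]
def pvDangerousSubstrings : List String := ["&&", "||", "$("]

def validate_env_var_value (value : String) : Bool :=
  if pvDangerousChars.any (fun c => PySem.Str.isIn c value) then false
  else if pvDangerousSubstrings.any (fun s => PySem.Str.isIn s value) then false
  else true

-- ===== PORT B =====
def pvAltBadChar (c : Char) : Bool :=
  c == '\n' || c == '\r' || c == '\x00' || c == ';' || c == '`'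

def pvAltLoop : Option Char → List Char → Bool
  | _, [] => true
  | prev, c :: rest =>
    if pvAltBadChar c then false
    else if (prev == some '&' && c == '&') || (prev == some '|' && c == '|')
            || (prev == some '$' && c == '(') then false
    else pvAltLoop (some c) rest

def validate_env_var_value_alt (value : String) : Bool :=
  pvAltLoop none value.toList

-- ===== PRECONDITION & SPEC =====
def Spec_validate_env_var_value (value : String) (out : Bool) : Prop := out = validate_env_var_value_alt value
instance (value : String) (out : Bool) : Decidable (Spec_validate_env_var_value value out) := by unfold Spec_validate_env_var_value; infer_instance

-- ===== CLAIM (what is proved, stated in full; the proofs are below) =====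
def Claim_equal_validate_env_var_value : Prop := ∀ (value : String), Dom_validate_env_var_value value → Spec_validate_env_var_value value (validate_env_var_value value)

-- ===== LEMMAS AND PROOFS =====

lemma pv_isIn_singleton (a : Char) (l : List Char) :
    PySem.Chars.isIn [a] l = l.contains a := by
  rcases h : PySem.Chars.isIn [a] l with _ | _
  · rw [PySem.Chars.isIn_eq_false_iff] at h
    symm; rw [Bool.eq_false_iff]
    intro hc
    rcases List.mem_iff_append.mp (List.contains_iff_mem.mp hc) with ⟨s, t, rfl⟩
    exact h ⟨s, t, by simp⟩
  · rw [PySem.Chars.isIn_iff_infix] at h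
    symm; rw [List.contains_iff_mem]
    exact h.subset (by simp)

lemma pv_pair_prefix (a b : Char) (l : List Char) :
    [a, b] <+: l ↔ ∃ t, l = a :: b :: t := by
  constructor
  · rintro ⟨t, rfl⟩; exact ⟨t, rfl⟩
  · rintro ⟨t, rfl⟩; exact ⟨t, rfl⟩

lemma pv_isIn_pair_cons (a b c : Char) (l : List Char) :
    PySem.Chars.isIn [a, b] (c :: l)
      = ((c == a && l.head? == some b) || PySem.Chars.isIn [a, b] l) := by
  rw [Bool.eq_iff_iff]
  simp only [Bool.or_eq_true, Bool.and_eq_true, beq_iff_eq,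
    PySem.Chars.isIn_iff_infix, List.infix_cons_iff]
  constructor
  · rintro (hp | hi)
    · rcases (pv_pair_prefix a b (c :: l)).mp hp with ⟨t, ht⟩
      cases ht
      exact Or.inl ⟨rfl, rfl⟩
    · exact Or.inr hi
  · rintro (⟨rfl, hh⟩ | hi)
    · rcases l with _ | ⟨d, t⟩
      · simp at hh
      · simp at hh
        subst hh
        exact Or.inl ⟨t, rfl⟩
    · exact Or.inr hi

lemma pv_some_beq (a b : Char) : (some a == some b) = (a == b) := rfl

lemma pv_none_beq (a : Char) : ((none : Option Char) == some a) = false := rfl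

def pvNoBoundary (prev : Option Char) (h : Option Char) : Bool :=
  !((prev == some '&' && h == some '&') || (prev == some '|' && h == some '|')
     || (prev == some '$' && h == some '('))

lemma pv_altLoop_spec (prev : Option Char) (l : List Char) :
    pvAltLoop prev l =
      (!(l.any pvAltBadChar)
       && !(PySem.Chars.isIn ['&','&'] l) && !(PySem.Chars.isIn ['|','|'] l)
       && !(PySem.Chars.isIn ['$','('] l)
       && pvNoBoundary prev l.head?) := by
  induction l generalizing prev with
  | nil =>
    cases prev <;> simp [pvAltLoop, pvNoBoundary] <;> decide
  | cons c rest ih =>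
    rw [pvAltLoop, ih (some c)]
    rw [pv_isIn_pair_cons, pv_isIn_pair_cons, pv_isIn_pair_cons]
    simp only [pvNoBoundary, List.any_cons, List.head?_cons, pv_some_beq]
    generalize pvAltBadChar c = bad
    generalize rest.any pvAltBadChar = w
    generalize PySem.Chars.isIn ['&','&'] rest = X
    generalize PySem.Chars.isIn ['|','|'] rest = Y
    generalize PySem.Chars.isIn ['$','('] rest = Z
    generalize (c == '&') = a1
    generalize (c == '|') = a2
    generalize (c == '$') = a3
    generalize (c == '(') = a4
    generalize (prev == some '&') = p1
    generalize (prev == some '|') = p2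
    generalize (prev == some '$') = p3
    generalize (rest.head? == some '&') = h1
    generalize (rest.head? == some '|') = h2
    generalize (rest.head? == some '(') = h3
    revert bad w X Y Z a1 a2 a3 a4 p1 p2 p3 h1 h2 h3
    decide

lemma pv_lit_newline : "\n".toList = ['\n'] := by decide
lemma pv_lit_cr : "\r".toList = ['\r'] := by decide
lemma pv_lit_nul : "\x00".toList = ['\x00'] := by decide
lemma pv_lit_semi : ";".toList = [';'] := by decide
lemma pv_lit_tick : "`".toList = ['`'] := by decide
lemma pv_lit_amp : "&&".toList = ['&','&'] := by decide
lemma pv_lit_pipe : "||".toList = ['|','|'] := by decide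
lemma pv_lit_dollar : "$(".toList = ['$','('] := by decide

-- ===== VERDICT (by name: the statement is the Claim_ definition above) =====
theorem validate_env_var_value_spec : Claim_equal_validate_env_var_value := by
  intro value _
  unfold Spec_validate_env_var_value validate_env_var_value validate_env_var_value_alt
  rw [pv_altLoop_spec]
  simp only [pvDangerousChars, pvDangerousSubstrings, List.any_cons, List.any_nil,
    PySem.Str.isIn_eq, pv_lit_newline, pv_lit_cr, pv_lit_nul, pv_lit_semi, pv_lit_tick,
    pv_lit_amp, pv_lit_pipe, pv_lit_dollar, pv_isIn_singleton, pvNoBoundary, pv_none_beq, Bool.false_and,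
    Bool.false_or, Bool.not_false, Bool.and_true]
  generalize value.toList = l
  generalize PySem.Chars.isIn ['&','&'] l = X
  generalize PySem.Chars.isIn ['|','|'] l = Y
  generalize PySem.Chars.isIn ['$','('] l = Z
  have hany : l.any pvAltBadChar
      = (l.contains '\n' || l.contains '\r' || l.contains '\x00'
          || l.contains ';' || l.contains '`') := by
    induction l with
    | nil => rfl
    | cons c t ih =>
      simp only [List.any_cons, List.contains_cons, ih, pvAltBadChar]
      rw [show ('\n' == c) = (c == '\n') from by simp [eq_comm],
        show ('\x0d' == c) = (c == '\r') from by simp [eq_comm],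
        show ('\x00' == c) = (c == '\x00') from by simp [eq_comm],
        show (';' == c) = (c == ';') from by simp [eq_comm],
        show ('`' == c) = (c == '`') from by simp [eq_comm]]
      generalize (c == '\n') = b1
      generalize (c == '\r') = b2
      generalize (c == '\x00') = b3
      generalize (c == ';') = b4
      generalize (c == '`') = b5
      generalize t.contains '\n' = t1
      generalize t.contains '\r' = t2
      generalize t.contains '\x00' = t3
      generalize t.contains ';' = t4
      generalize t.contains '`' = t5
      revert b1 b2 b3 b4 b5 t1 t2 t3 t4 t5
      decide
  rw [hany]
  generalize l.contains '\n' = t1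
  generalize l.contains '\r' = t2
  generalize l.contains '\x00' = t3
  generalize l.contains ';' = t4
  generalize l.contains '`' = t5
  revert X Y Z t1 t2 t3 t4 t5
  decide
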